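-- pv_equiv track=rewrite | github.com/gawlowski-mateusz/Lie-Detector | prepare_data.py | validate_participant_data
-- ===== SOURCE A (Python) =====
-- def validate_participant_data(uuid, files):
--     """Verify that participant has all required experimental blocks."""
--     required_blocks = [
--         "HONEST_RESPONSE_TO_TRUE_IDENTITY",
--         "DECEITFUL_RESPONSE_TO_TRUE_IDENTITY",
--         "HONEST_RESPONSE_TO_FAKE_IDENTITY",
--         "DECEITFUL_RESPONSE_TO_FAKE_IDENTITY"
--     ]
--     return all(any(block in f for f in files) for block in required_blocks)
-- ===== SOURCE B (Python) =====
-- def validate_participant_data(uuid, files):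
--     """Verify that participant has all required experimental blocks."""
--     missing = [
--         "HONEST_RESPONSE_TO_TRUE_IDENTITY",
--         "DECEITFUL_RESPONSE_TO_TRUE_IDENTITY",
--         "HONEST_RESPONSE_TO_FAKE_IDENTITY",
--         "DECEITFUL_RESPONSE_TO_FAKE_IDENTITY"
--     ]
--     for f in files:
--         if not missing:
--             break
--         missing = [b for b in missing if b not in f]
--     return not missing
-- ===== Notes on version B (the rewrite author's own statement) =====
-- stated objective: alternative
-- what changed: B maintains a shrinking worklist of still-missing blocks, filtering it against each file and breaking out early once it is empty, instead of A's blocks-outer all/any rescan of the whole file list for every block.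
import Mathlib
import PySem

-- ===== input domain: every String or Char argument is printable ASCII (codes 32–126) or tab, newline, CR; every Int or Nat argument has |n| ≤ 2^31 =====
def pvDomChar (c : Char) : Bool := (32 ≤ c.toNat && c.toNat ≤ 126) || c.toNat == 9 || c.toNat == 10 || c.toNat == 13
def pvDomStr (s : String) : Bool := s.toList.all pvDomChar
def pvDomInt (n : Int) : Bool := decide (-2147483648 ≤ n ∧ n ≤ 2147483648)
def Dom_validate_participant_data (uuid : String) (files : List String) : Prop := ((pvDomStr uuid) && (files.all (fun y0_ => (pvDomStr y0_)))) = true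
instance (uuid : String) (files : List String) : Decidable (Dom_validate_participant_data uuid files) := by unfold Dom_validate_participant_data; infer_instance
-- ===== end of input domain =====

-- B replaces A's blocks-outer all/any scan by a shrinking worklist of missing blocks with an early break (alternative decomposition, same cost).


-- ===== PORT A =====
def requiredBlocksA : List String :=
  ["HONEST_RESPONSE_TO_TRUE_IDENTITY",
   "DECEITFUL_RESPONSE_TO_TRUE_IDENTITY",
   "HONEST_RESPONSE_TO_FAKE_IDENTITY",
   "DECEITFUL_RESPONSE_TO_FAKE_IDENTITY"]

def validate_participant_data (uuid : String) (files : List String) : Bool :=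
  requiredBlocksA.all (fun block => files.any (fun f => PySem.Str.isIn block f))

-- ===== PORT B =====
def requiredBlocksB : List String :=
  ["HONEST_RESPONSE_TO_TRUE_IDENTITY",
   "DECEITFUL_RESPONSE_TO_TRUE_IDENTITY",
   "HONEST_RESPONSE_TO_FAKE_IDENTITY",
   "DECEITFUL_RESPONSE_TO_FAKE_IDENTITY"]

-- the for-loop over files with the early 'break' once nothing is missing
def vpdLoop (missing : List String) (files : List String) : List String :=
  match files with
  | [] => missing
  | f :: rest =>
    if missing.isEmpty then missing
    else vpdLoop (missing.filter (fun b => !PySem.Str.isIn b f)) rest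

def validate_participant_data_alt (uuid : String) (files : List String) : Bool :=
  (vpdLoop requiredBlocksB files).isEmpty

-- ===== PRECONDITION & SPEC =====
def Spec_validate_participant_data (uuid : String) (files : List String) (out : Bool) : Prop := out = validate_participant_data_alt uuid files
instance (uuid : String) (files : List String) (out : Bool) : Decidable (Spec_validate_participant_data uuid files out) := by unfold Spec_validate_participant_data; infer_instance

-- ===== CLAIM (what is proved, stated in full; the proofs are below) =====
def Claim_equal_validate_participant_data : Prop := ∀ (uuid : String) (files : List String), Dom_validate_participant_data uuid files → Spec_validate_participant_data uuid files (validate_participant_data uuid files)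

-- ===== LEMMAS AND PROOFS =====

-- ===== VERDICT (by name: the statement is the Claim_ definition above) =====
theorem vpdLoop_eq_filter (missing files : List String) :
    vpdLoop missing files
      = missing.filter (fun b => !files.any (fun f => PySem.Str.isIn b f)) := by
  induction files generalizing missing with
  | nil => simp [vpdLoop]
  | cons f rest ih =>
    unfold vpdLoop
    by_cases h : missing.isEmpty
    · have : missing = [] := by simpa [List.isEmpty_iff] using h
      simp [this]
    · simp only [if_neg h, ih, List.filter_filter]
      apply List.filter_congr
      intro b _
      simp [List.any_cons, Bool.and_comm]

theorem validate_participant_data_spec : Claim_equal_validate_participant_data := by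
  intro uuid files _
  unfold Spec_validate_participant_data validate_participant_data validate_participant_data_alt
  have hreq : requiredBlocksA = requiredBlocksB := rfl
  rw [hreq, vpdLoop_eq_filter, Bool.eq_iff_iff]
  simp only [List.all_eq_true, List.isEmpty_iff, List.filter_eq_nil_iff]
  constructor
  · intro h b hb
    have := h b hb
    simp only [List.any_eq_true] at this ⊢
    simpa using this
  · intro h b hb
    have := h b hb
    simp only [List.any_eq_true] at this ⊢
    simpa using this
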